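-- pv_equiv track=rewrite | github.com/mihai2610/mas_labs | lab6/stv_analysis.py | get_next_candidate
-- ===== SOURCE A (Python) =====
-- from typing import List, Dict, Tuple
-- import collections
--
-- def get_next_candidate(candidate: int, possible_candidates: List[int], next_candidates: Dict[int, Dict[int, int]]):
-- 	if candidate not in next_candidates:
-- 		return None
--
-- 	candidates_ranks_desc = collections.OrderedDict(
-- 		sorted(next_candidates[candidate].items(), key=lambda x: x[1], reverse=True))
--
-- 	for possible_candidate in candidates_ranks_desc.keys():
-- 		if possible_candidate in possible_candidates:
-- 			return possible_candidate
--
-- 	return None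
-- ===== SOURCE B (Python) =====
-- from typing import List, Dict
--
--
-- def get_next_candidate(candidate: int, possible_candidates: List[int], next_candidates: Dict[int, Dict[int, int]]):
-- 	ranks = next_candidates.get(candidate)
-- 	if ranks is None:
-- 		return None
--
-- 	allowed = set(possible_candidates)
-- 	best = None  # best (key, rank) item seen so far; strict '>' keeps the earliest on rank ties
-- 	for key, rank in ranks.items():
-- 		if key in allowed and (best is None or rank > best[1]):
-- 			best = (key, rank)
--
-- 	return None if best is None else best[0]
-- ===== Notes on version B (the rewrite author's own statement) =====
-- stated objective: alternative
-- what changed: Replaces sorting all ranked successors descending (plus the OrderedDict construction and a list-membership scan over the sorted keys) by a single pass over the rank items keeping the best set-membership candidate, where strict '>' reproduces the stable sort's earliest-on-tie choice.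
import Mathlib
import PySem

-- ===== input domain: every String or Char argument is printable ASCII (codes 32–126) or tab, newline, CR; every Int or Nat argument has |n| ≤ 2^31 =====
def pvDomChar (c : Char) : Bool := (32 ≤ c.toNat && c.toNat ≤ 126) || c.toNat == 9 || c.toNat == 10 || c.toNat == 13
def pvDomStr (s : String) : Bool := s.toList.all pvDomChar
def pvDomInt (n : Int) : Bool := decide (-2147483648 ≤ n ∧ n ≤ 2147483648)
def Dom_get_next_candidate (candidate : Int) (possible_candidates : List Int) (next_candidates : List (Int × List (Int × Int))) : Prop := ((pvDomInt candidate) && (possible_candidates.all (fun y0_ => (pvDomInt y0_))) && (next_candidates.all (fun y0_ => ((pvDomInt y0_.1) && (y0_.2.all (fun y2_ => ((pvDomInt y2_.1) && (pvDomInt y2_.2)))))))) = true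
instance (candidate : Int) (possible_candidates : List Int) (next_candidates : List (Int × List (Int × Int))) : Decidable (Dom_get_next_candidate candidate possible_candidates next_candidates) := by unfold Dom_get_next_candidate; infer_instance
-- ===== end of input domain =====

-- B replaces A's sort-then-scan (sort all ranked successors descending, return the first key
-- that is a possible candidate) by a single running-maximum pass with strict '>' (keeps the
-- earliest item on rank ties, exactly the stable descending sort's tie-break); objective: alternative.

-- ===== PORT A =====
def get_next_candidate (candidate : Int) (possible_candidates : List Int) (next_candidates : List (Int × List (Int × Int))) : Option Int :=
  -- 'if candidate not in next_candidates: return None' then 'next_candidates[candidate]'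
  match (PySem.Dict.mk next_candidates).get? candidate with
  | none => none
  | some items =>
    -- collections.OrderedDict(sorted(next_candidates[candidate].items(), key=lambda x: x[1], reverse=True))
    let candidates_ranks_desc := PySem.Dict.ofList (PySem.List.sorted items (fun x => x.2) true)
    -- for possible_candidate in candidates_ranks_desc.keys(): if possible_candidate in possible_candidates: return it; else None
    candidates_ranks_desc.keys.find? (fun k => possible_candidates.contains k)

-- ===== PORT B =====
def get_next_candidate_alt (candidate : Int) (possible_candidates : List Int) (next_candidates : List (Int × List (Int × Int))) : Option Int :=
  -- ranks = next_candidates.get(candidate); if ranks is None: return None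
  match (PySem.Dict.mk next_candidates).get? candidate with
  | none => none
  | some ranks =>
    -- allowed = set(possible_candidates)
    let allowed : PySem.Set Int := PySem.Set.ofList possible_candidates
    -- single pass: best (key, rank) item, strict '>' keeps the earliest on ties
    let best := ranks.foldl
      (fun (best : Option (Int × Int)) kr =>
        if allowed.contains kr.1 && (match best with | none => true | some b => decide (b.2 < kr.2))
        then some kr else best) none
    match best with
    | none => none
    | some b => some b.1

-- ===== PRECONDITION & SPEC =====
def Spec_get_next_candidate (candidate : Int) (possible_candidates : List Int) (next_candidates : List (Int × List (Int × Int))) (out : Option Int) : Prop := out = get_next_candidate_alt candidate possible_candidates next_candidates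
instance (candidate : Int) (possible_candidates : List Int) (next_candidates : List (Int × List (Int × Int))) (out : Option Int) : Decidable (Spec_get_next_candidate candidate possible_candidates next_candidates out) := by unfold Spec_get_next_candidate; infer_instance

-- ===== CLAIM (what is proved, stated in full; the proofs are below) =====
def Claim_equal_get_next_candidate : Prop := ∀ (candidate : Int) (possible_candidates : List Int) (next_candidates : List (Int × List (Int × Int))), Dom_get_next_candidate candidate possible_candidates next_candidates → Spec_get_next_candidate candidate possible_candidates next_candidates (get_next_candidate candidate possible_candidates next_candidates)

-- ===== LEMMAS AND PROOFS =====

-- the insertion predicate of PySem.List.sorted with key = rank, reverse = True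
def pvBefore : (Int × Int) → (Int × Int) → Bool := fun a b => decide (b.2 < a.2)

-- B's loop body, with the membership test already rewritten to plain list membership
def pvStep (q : Int → Bool) (b : Option (Int × Int)) (kr : Int × Int) : Option (Int × Int) :=
  if q kr.1 && (match b with | none => true | some m => decide (m.2 < kr.2)) then some kr else b

lemma insertBy_cons (x y : Int × Int) (ys : List (Int × Int)) :
    PySem.List.insertBy pvBefore x (y :: ys)
      = if y.2 < x.2 then x :: y :: ys else y :: PySem.List.insertBy pvBefore x ys := by
  show (if pvBefore x y then _ else _) = _
  by_cases h : y.2 < x.2 <;> simp [pvBefore, h]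

lemma pairwise_insertBy (x : Int × Int) (acc : List (Int × Int))
    (h : acc.Pairwise (fun a b => b.2 ≤ a.2)) :
    (PySem.List.insertBy pvBefore x acc).Pairwise (fun a b => b.2 ≤ a.2) := by
  induction acc with
  | nil => simp [PySem.List.insertBy]
  | cons y ys ih =>
    rw [List.pairwise_cons] at h
    rw [insertBy_cons]
    by_cases hb : y.2 < x.2
    · rw [if_pos hb]
      refine List.Pairwise.cons ?_ (List.Pairwise.cons h.1 h.2)
      intro z hz
      rcases List.mem_cons.1 hz with rfl | hz
      · omega
      · have := h.1 z hz; omega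
    · rw [if_neg hb]
      refine List.Pairwise.cons ?_ (ih h.2)
      intro z hz
      rcases (PySem.List.mem_insertBy pvBefore x z ys).1 hz with rfl | hz
      · omega
      · exact h.1 z hz

lemma find?_insertBy (q : Int → Bool) (x : Int × Int) (acc : List (Int × Int))
    (h : acc.Pairwise (fun a b => b.2 ≤ a.2)) :
    (PySem.List.insertBy pvBefore x acc).find? (fun kr => q kr.1)
      = pvStep q (acc.find? (fun kr => q kr.1)) x := by
  induction acc with
  | nil => by_cases hq : q x.1 <;> simp [PySem.List.insertBy, pvStep, hq]
  | cons y ys ih =>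
    rw [List.pairwise_cons] at h
    rw [insertBy_cons]
    by_cases hb : y.2 < x.2
    · rw [if_pos hb, List.find?_cons]
      by_cases hq : q x.1
      · rcases hm : (y :: ys).find? (fun kr => q kr.1) with _ | m
        · simp [pvStep, hq, hm]
        · have hmem := List.mem_of_find?_eq_some hm
          have hle : m.2 ≤ y.2 := by
            rcases List.mem_cons.1 hmem with rfl | hmem'
            · omega
            · exact h.1 m hmem'
          simp only [pvStep, hq, hm, Bool.true_and]
          rw [if_pos (by simp; omega)]
      · rcases hm : (y :: ys).find? (fun kr => q kr.1) with _ | m <;>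
          simp [pvStep, hq, hm]
    · rw [if_neg hb, List.find?_cons, List.find?_cons]
      by_cases hy : q y.1
      · simp only [hy]
        simp only [pvStep]
        rw [if_neg (by simp; omega)]
      · simp only [hy]
        exact ih h.2

lemma find?_foldl_insertBy (q : Int → Bool) (l acc : List (Int × Int))
    (h : acc.Pairwise (fun a b => b.2 ≤ a.2)) :
    ((l.foldl (fun acc x => PySem.List.insertBy pvBefore x acc) acc).find? (fun kr => q kr.1))
      = l.foldl (pvStep q) (acc.find? (fun kr => q kr.1)) := by
  induction l generalizing acc with
  | nil => rfl
  | cons x t ih =>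
    simp only [List.foldl_cons]
    rw [ih _ (pairwise_insertBy x acc h), find?_insertBy q x acc h]

-- first matching item of the stable descending sort = B's single running-maximum pass
lemma find?_sorted_rev (q : Int → Bool) (l : List (Int × Int)) :
    ((PySem.List.sorted l (fun x => x.2) true).find? (fun kr => q kr.1))
      = l.foldl (pvStep q) none := by
  rw [PySem.List.sorted_rev_eq_foldl_insertBy]
  exact find?_foldl_insertBy q l [] List.Pairwise.nil

-- first matching key of d.update l, for any starting dict d
lemma find?_keys_update {κ ν : Type} [BEq κ] [LawfulBEq κ] (q : κ → Bool)
    (l : List (κ × ν)) (d : PySem.Dict κ ν) :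
    ((d.update l).keys.find? q) = (d.keys.find? q).or ((l.map Prod.fst).find? q) := by
  induction l generalizing d with
  | nil => simp [PySem.Dict.update]
  | cons p t ih =>
    rcases p with ⟨k, v⟩
    show (((d.insert k v).update t).keys.find? q) = _
    rw [ih]
    simp only [List.map_cons, List.find?_cons]
    by_cases hc : d.contains k
    · rw [PySem.Dict.keys_insert_of_contains d v hc]
      by_cases hq : q k
      · have hk : k ∈ d.keys := (PySem.Dict.contains_iff_mem_keys d k).1 hc
        rcases hm : d.keys.find? q with _ | m
        · exact absurd (List.find?_eq_none.1 hm k hk hq) (by simp)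
        · simp [hq]
      · simp [hq]
    · rw [PySem.Dict.keys_insert_of_not_contains d v (by simpa using hc)]
      rw [List.find?_append]
      by_cases hq : q k <;>
        rcases hm : d.keys.find? q with _ | m <;>
          simp [hq]

-- first matching key of OrderedDict(pairs) = first matching key of the pair list itself
lemma find?_keys_ofList (q : Int → Bool) (l : List (Int × Int)) :
    ((PySem.Dict.ofList l).keys.find? q) = (l.map Prod.fst).find? q := by
  show ((PySem.Dict.empty.update l).keys.find? q) = _
  rw [find?_keys_update]
  simp [PySem.Dict.empty]

theorem get_next_candidate_spec' (candidate : Int) (possible_candidates : List Int)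
    (next_candidates : List (Int × List (Int × Int))) :
    get_next_candidate candidate possible_candidates next_candidates
      = get_next_candidate_alt candidate possible_candidates next_candidates := by
  unfold get_next_candidate get_next_candidate_alt
  rcases (PySem.Dict.mk next_candidates).get? candidate with _ | items
  · rfl
  · simp only []
    rw [find?_keys_ofList, List.find?_map]
    have hcongr : items.foldl
        (fun (best : Option (Int × Int)) kr =>
          if (PySem.Set.ofList possible_candidates).contains kr.1 &&
              (match best with | none => true | some b => decide (b.2 < kr.2))
          then some kr else best) none
        = items.foldl (pvStep (fun k => possible_candidates.contains k)) none := by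
      refine PySem.List.foldl_congr_mem _ _ _ _ ?_
      intro acc x _
      simp [pvStep]
    rw [hcongr, ← find?_sorted_rev]
    have hpred : ((fun k => possible_candidates.contains k) ∘ Prod.fst)
        = (fun kr : Int × Int => possible_candidates.contains kr.1) := rfl
    rw [hpred]
    rcases hf : (PySem.List.sorted items (fun x => x.2) true).find?
        (fun kr : Int × Int => possible_candidates.contains kr.1) with _ | b <;> simp

-- ===== VERDICT (by name: the statement is the Claim_ definition above) =====
theorem get_next_candidate_spec : Claim_equal_get_next_candidate := by
  intro candidate possible_candidates next_candidates _
  exact get_next_candidate_spec' candidate possible_candidates next_candidates
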